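-- pv_equiv track=rewrite | github.com/DomML/ssDNAbenchmark | superimpose.py | get_sequence_alignment
-- ===== SOURCE A (Python) =====
-- def get_sequence_alignment(fatcat_aln : str):
--     aln = [j[14:] for i,j in enumerate(fatcat_aln.split("\n")[:-3]) if (len(j) > 0 and i >= 4)]
--     ch1 = "".join([i for i in aln[0::3]])
--     info = "".join([i for i in aln[1::3]])
--     ch2 = "".join([i for i in aln[2::3]])
--
--     all_c1, all_c2 = "",""
--     prev_info, prev_c1, prev_c2 = "", "", ""
--     print_info, print_c1, print_c2 = "", "", ""
--     for c1, inf, c2 in zip(ch1,info,ch2):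
--         if inf == "1":
--             print_info, print_c1, print_c2 = print_info+"1", print_c1+c1, print_c2+c2
--
--         if prev_info == "1" and inf != "1":
--             if len(print_c1) > 10 and print_c1 == print_c2:
--                 all_c1 = all_c1 + " " + print_c1
--                 all_c2 = all_c2 + " " + print_c2
--             print_info, print_c1, print_c2 = "", "", ""
--         prev_info, prev_c1, prev_c2 = inf, c1, c2
--
--     if len(print_c1) > 5 and print_c1 == print_c2:
--         all_c1 = all_c1 + " " + print_c1
--         all_c2 = all_c2 + " " + print_c2
--
--     return all_c1.replace("-", " ")[1:], all_c2.replace("-", " ")[1:]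
-- ===== SOURCE B (Python) =====
-- def _runs(triples):
--     # maximal blocks of consecutive triples whose info char is '1',
--     # each paired with whether the block reaches the end of the list
--     out = []
--     i, n = 0, len(triples)
--     while i < n:
--         if triples[i][1] != "1":
--             i += 1
--             continue
--         j = i
--         while j < n and triples[j][1] == "1":
--             j += 1
--         out.append((triples[i:j], j == n))
--         i = j
--     return out
--
--
-- def get_sequence_alignment(fatcat_aln: str):
--     aln = [j[14:] for i, j in enumerate(fatcat_aln.split("\n")[:-3])
--            if (len(j) > 0 and i >= 4)]
--     ch1 = "".join(aln[0::3])
--     info = "".join(aln[1::3])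
--     ch2 = "".join(aln[2::3])
--
--     parts1, parts2 = [], []
--     for run, at_end in _runs(list(zip(ch1, info, ch2))):
--         s1 = "".join(t[0] for t in run)
--         s2 = "".join(t[2] for t in run)
--         if len(s1) > (5 if at_end else 10) and s1 == s2:
--             parts1.append(s1)
--             parts2.append(s2)
--
--     out1 = "".join(" " + s for s in parts1)
--     out2 = "".join(" " + s for s in parts2)
--     return out1.replace("-", " ")[1:], out2.replace("-", " ")[1:]
-- ===== Notes on version B (the rewrite author's own statement) =====
-- stated objective: alternative
-- what changed: Replaces A's one-pass five-accumulator state machine (prev/print buffers flushed on every transition out of a conserved column, plus a trailing flush) by a group-then-filter decomposition: split the zipped columns into maximal runs of conserved-flag columns, apply the length threshold (lower for a run touching the end) and the equal-substrings test per run, and join the survivors.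
import Mathlib
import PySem

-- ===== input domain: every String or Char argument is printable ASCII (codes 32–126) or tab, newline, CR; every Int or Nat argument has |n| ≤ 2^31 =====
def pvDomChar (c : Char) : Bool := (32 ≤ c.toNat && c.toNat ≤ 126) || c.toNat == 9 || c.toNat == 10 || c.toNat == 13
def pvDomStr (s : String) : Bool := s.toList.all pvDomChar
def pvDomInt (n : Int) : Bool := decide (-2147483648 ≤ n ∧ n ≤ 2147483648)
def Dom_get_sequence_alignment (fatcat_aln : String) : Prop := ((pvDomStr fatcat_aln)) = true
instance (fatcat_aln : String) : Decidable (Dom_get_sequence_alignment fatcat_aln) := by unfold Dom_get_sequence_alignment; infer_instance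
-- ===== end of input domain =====

-- B replaces A's one-pass flush-on-transition state machine by maximal-run grouping and
-- per-run filtering (alternative decomposition, same cost); ports agree on every input.

-- ===== PORT A =====

-- shared header parsing (the first four lines of both Pythons are identical, character for character):
-- aln = [j[14:] for i,j in enumerate(fatcat_aln.split("\n")[:-3]) if (len(j) > 0 and i >= 4)]
-- ch1/info/ch2 = "".join(aln[k::3]) for k = 0,1,2   (slice? step 3 ≠ 0 can never be none)
def pvHeaderA (s : String) : List Char × List Char × List Char :=
  let lines := PySem.Chars.splitOn s.toList ['\n']
  let aln := ((PySem.List.enumerate (PySem.List.slice lines none (some (-3)))).filter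
      (fun ij => decide (0 < ij.2.length) && decide ((4 : Int) ≤ ij.1))).map
      (fun ij => PySem.List.slice ij.2 (some 14) none)
  (PySem.Chars.join [] ((PySem.List.slice? aln (some 0) none 3).getD []),
   PySem.Chars.join [] ((PySem.List.slice? aln (some 1) none 3).getD []),
   PySem.Chars.join [] ((PySem.List.slice? aln (some 2) none 3).getD []))

-- the loop state: all_c1, all_c2, prev_info/prev_c1/prev_c2 (1-char strings as Option Char, "" = none),
-- print_info, print_c1, print_c2
structure AState where
  all1 : List Char
  all2 : List Char
  prev : Option Char
  pv1  : Option Char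
  pv2  : Option Char
  pi   : List Char
  p1   : List Char
  p2   : List Char

-- one iteration of "for c1, inf, c2 in zip(ch1, info, ch2)"
def aStep (st : AState) (x : Char × Char × Char) : AState :=
  let c1 := x.1; let inf := x.2.1; let c2 := x.2.2
  let st1 := if inf == '1' then
      { st with pi := st.pi ++ ['1'], p1 := st.p1 ++ [c1], p2 := st.p2 ++ [c2] } else st
  let st2 := if st1.prev == some '1' && !(inf == '1') then
      let st' := if decide (10 < st1.p1.length) && st1.p1 == st1.p2 then
          { st1 with all1 := st1.all1 ++ ' ' :: st1.p1, all2 := st1.all2 ++ ' ' :: st1.p2 } else st1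
      { st' with pi := [], p1 := [], p2 := [] }
    else st1
  { st2 with prev := some inf, pv1 := some c1, pv2 := some c2 }

-- the trailing "if len(print_c1) > 5 and print_c1 == print_c2" flush
def aFinish (st : AState) : List Char × List Char :=
  if decide (5 < st.p1.length) && st.p1 == st.p2 then
    (st.all1 ++ ' ' :: st.p1, st.all2 ++ ' ' :: st.p2)
  else (st.all1, st.all2)

def get_sequence_alignment (fatcat_aln : String) : String × String :=
  let h := pvHeaderA fatcat_aln
  let st := ((h.1).zip ((h.2.1).zip h.2.2)).foldl aStep ⟨[], [], none, none, none, [], [], []⟩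
  let fin := aFinish st
  (String.ofList (PySem.List.slice (PySem.Chars.replace fin.1 ['-'] [' ']) (some 1) none),
   String.ofList (PySem.List.slice (PySem.Chars.replace fin.2 ['-'] [' ']) (some 1) none))

-- ===== PORT B =====

-- identical header parsing (same four lines of Source B)
def pvHeaderB (s : String) : List Char × List Char × List Char :=
  let lines := PySem.Chars.splitOn s.toList ['\n']
  let aln := ((PySem.List.enumerate (PySem.List.slice lines none (some (-3)))).filter
      (fun ij => decide (0 < ij.2.length) && decide ((4 : Int) ≤ ij.1))).map
      (fun ij => PySem.List.slice ij.2 (some 14) none)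
  (PySem.Chars.join [] ((PySem.List.slice? aln (some 0) none 3).getD []),
   PySem.Chars.join [] ((PySem.List.slice? aln (some 1) none 3).getD []),
   PySem.Chars.join [] ((PySem.List.slice? aln (some 2) none 3).getD []))

def pvIs1 (x : Char × Char × Char) : Bool := x.2.1 == '1'

-- _runs: the outer while-loop; skipping a non-'1' is the tail recursion, the inner
-- "while j < n and triples[j][1] == '1'" is takeWhile/dropWhile, "j == n" is rest.isEmpty
def pvRuns : List (Char × Char × Char) → List (List (Char × Char × Char) × Bool)
  | [] => []
  | x :: t =>
    if _h : pvIs1 x then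
      ((x :: t).takeWhile pvIs1, ((x :: t).dropWhile pvIs1).isEmpty) :: pvRuns ((x :: t).dropWhile pvIs1)
    else pvRuns t
termination_by l => l.length
decreasing_by
  · simp only [List.dropWhile_cons, _h, if_true]
    exact Nat.lt_succ_of_le (List.length_dropWhile_le _ t)
  · simp

-- the per-run test: len(s1) > (5 if at_end else 10) and s1 == s2
def pvPass (rb : List (Char × Char × Char) × Bool) : Bool :=
  decide ((if rb.2 then 5 else 10) < (rb.1.map (fun u => u.1)).length) &&
    (rb.1.map (fun u => u.1)) == (rb.1.map (fun u => u.2.2))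

def get_sequence_alignment_alt (fatcat_aln : String) : String × String :=
  let h := pvHeaderB fatcat_aln
  let triples := (h.1).zip ((h.2.1).zip h.2.2)
  let parts := (pvRuns triples).foldl
    (fun (acc : List (List Char) × List (List Char)) rb =>
      if pvPass rb then
        (acc.1 ++ [rb.1.map (fun u => u.1)], acc.2 ++ [rb.1.map (fun u => u.2.2)])
      else acc)
    ([], [])
  let out1 := PySem.Chars.join [] (parts.1.map (fun t => ' ' :: t))
  let out2 := PySem.Chars.join [] (parts.2.map (fun t => ' ' :: t))
  (String.ofList (PySem.List.slice (PySem.Chars.replace out1 ['-'] [' ']) (some 1) none),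
   String.ofList (PySem.List.slice (PySem.Chars.replace out2 ['-'] [' ']) (some 1) none))

-- ===== PRECONDITION & SPEC =====
def Spec_get_sequence_alignment (fatcat_aln : String) (out : String × String) : Prop := out = get_sequence_alignment_alt fatcat_aln
instance (fatcat_aln : String) (out : String × String) : Decidable (Spec_get_sequence_alignment fatcat_aln out) := by unfold Spec_get_sequence_alignment; infer_instance

-- ===== CLAIM (what is proved, stated in full; the proofs are below) =====
def Claim_equal_get_sequence_alignment : Prop := ∀ (fatcat_aln : String), Dom_get_sequence_alignment fatcat_aln → Spec_get_sequence_alignment fatcat_aln (get_sequence_alignment fatcat_aln)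

-- ===== LEMMAS AND PROOFS =====

-- the concatenation " "+s over the passing runs, first and third component
def pvFlat1 (l : List (Char × Char × Char)) : List Char :=
  ((pvRuns l).filter pvPass).flatMap (fun rb => ' ' :: rb.1.map (fun u => u.1))
def pvFlat2 (l : List (Char × Char × Char)) : List Char :=
  ((pvRuns l).filter pvPass).flatMap (fun rb => ' ' :: rb.1.map (fun u => u.2.2))


theorem pvRuns_cons_pos (x : Char × Char × Char) (t : List (Char × Char × Char))
    (hx : pvIs1 x = true) :
    pvRuns (x :: t) = ((x :: t.takeWhile pvIs1, (t.dropWhile pvIs1).isEmpty) ::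
      pvRuns (t.dropWhile pvIs1)) := by
  rw [pvRuns]
  simp [hx]

theorem pvRuns_cons_neg (x : Char × Char × Char) (t : List (Char × Char × Char))
    (hx : pvIs1 x = false) : pvRuns (x :: t) = pvRuns t := by
  rw [pvRuns]
  simp [hx]

theorem pvMain (l : List (Char × Char × Char)) :
    (∀ a1 a2 prev pv1 pv2 pi, prev ≠ some '1' →
      aFinish (l.foldl aStep ⟨a1, a2, prev, pv1, pv2, pi, [], []⟩) =
        (a1 ++ pvFlat1 l, a2 ++ pvFlat2 l)) ∧
    (∀ a1 a2 pv1 pv2 pi r1 r2,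
      aFinish (l.foldl aStep ⟨a1, a2, some '1', pv1, pv2, pi, r1, r2⟩) =
        (let s1 := r1 ++ (l.takeWhile pvIs1).map (fun u => u.1)
         let s2 := r2 ++ (l.takeWhile pvIs1).map (fun u => u.2.2)
         let thr : Nat := if (l.dropWhile pvIs1).isEmpty then 5 else 10
         let b := if decide (thr < s1.length) && s1 == s2 then
             (a1 ++ ' ' :: s1, a2 ++ ' ' :: s2) else (a1, a2)
         (b.1 ++ pvFlat1 (l.dropWhile pvIs1), b.2 ++ pvFlat2 (l.dropWhile pvIs1)))) := by
  induction l with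
  | nil =>
    refine ⟨?_, ?_⟩
    · intro a1 a2 prev pv1 pv2 pi hprev
      simp [aFinish, pvFlat1, pvFlat2, pvRuns]
    · intro a1 a2 pv1 pv2 pi r1 r2
      simp [aFinish, pvFlat1, pvFlat2, pvRuns]
  | cons x t ih =>
    obtain ⟨ihN, ihR⟩ := ih
    refine ⟨?_, ?_⟩
    · intro a1 a2 prev pv1 pv2 pi hprev
      by_cases hx : pvIs1 x = true
      · have hinf : x.2.1 = '1' := by simpa [pvIs1] using hx
        have hstep : aStep ⟨a1, a2, prev, pv1, pv2, pi, [], []⟩ x =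
            ⟨a1, a2, some '1', some x.1, some x.2.2, pi ++ ['1'], [x.1], [x.2.2]⟩ := by
          simp [aStep, hinf]
        rw [List.foldl_cons, hstep, ihR]
        simp only [pvFlat1, pvFlat2, pvRuns_cons_pos x t hx, List.filter_cons, pvPass,
          List.map_cons, List.singleton_append]
        split
        · split
          · simp
          · simp
        · split
          · simp
          · simp
      · have hx' : pvIs1 x = false := by simpa using hx
        have hinf : ¬ (x.2.1 = '1') := by simpa [pvIs1] using hx'
        have hprevb : (prev == some '1') = false := by
          simpa using hprev
        have hstep : aStep ⟨a1, a2, prev, pv1, pv2, pi, [], []⟩ x =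
            ⟨a1, a2, some x.2.1, some x.1, some x.2.2, pi, [], []⟩ := by
          simp [aStep, hinf, hprevb]
        rw [List.foldl_cons, hstep, ihN _ _ _ _ _ _ (by simp [hinf])]
        simp [pvFlat1, pvFlat2, pvRuns_cons_neg x t hx']
    · intro a1 a2 pv1 pv2 pi r1 r2
      by_cases hx : pvIs1 x = true
      · have hinf : x.2.1 = '1' := by simpa [pvIs1] using hx
        have hstep : aStep ⟨a1, a2, some '1', pv1, pv2, pi, r1, r2⟩ x =
            ⟨a1, a2, some '1', some x.1, some x.2.2, pi ++ ['1'], r1 ++ [x.1], r2 ++ [x.2.2]⟩ := by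
          simp [aStep, hinf]
        rw [List.foldl_cons, hstep, ihR]
        simp only [List.takeWhile_cons, List.dropWhile_cons, hx, if_true]
        simp [List.append_assoc]
      · have hx' : pvIs1 x = false := by simpa using hx
        have hinf : ¬ (x.2.1 = '1') := by simpa [pvIs1] using hx'
        have hstep : aStep ⟨a1, a2, some '1', pv1, pv2, pi, r1, r2⟩ x =
            (if decide (10 < r1.length) && r1 == r2 then
              (⟨a1 ++ ' ' :: r1, a2 ++ ' ' :: r2, some x.2.1, some x.1, some x.2.2, [], [], []⟩ : AState)
             else ⟨a1, a2, some x.2.1, some x.1, some x.2.2, [], [], []⟩) := by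
          by_cases hc : (decide (10 < r1.length) && r1 == r2) = true
          · simp [aStep, hinf, hc]
          · simp [aStep, hinf, hc]
        rw [List.foldl_cons, hstep]
        simp only [List.takeWhile_cons, List.dropWhile_cons, hx']
        by_cases hc : (decide (10 < r1.length) && r1 == r2) = true
        · rw [if_pos hc, ihN _ _ _ _ _ _ (by simp [hinf])]
          simp [pvFlat1, pvFlat2, pvRuns_cons_neg x t hx', hc]
        · rw [if_neg hc, ihN _ _ _ _ _ _ (by simp [hinf])]
          simp [pvFlat1, pvFlat2, pvRuns_cons_neg x t hx', hc]

theorem pvJoinNil : ∀ (l : List (List Char)), PySem.Chars.join [] l = l.flatten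
  | [] => by simp [PySem.Chars.join_nil]
  | [x] => by simp [PySem.Chars.join_singleton]
  | x :: y :: t => by
    rw [PySem.Chars.join_cons_cons, pvJoinNil (y :: t)]; simp

theorem pvPartsEq (rs : List (List (Char × Char × Char) × Bool)) :
    rs.foldl
      (fun (acc : List (List Char) × List (List Char)) rb =>
        if pvPass rb then
          (acc.1 ++ [rb.1.map (fun u => u.1)], acc.2 ++ [rb.1.map (fun u => u.2.2)])
        else acc)
      ([], []) =
    ((rs.filter pvPass).map (fun rb => rb.1.map (fun u => u.1)),
     (rs.filter pvPass).map (fun rb => rb.1.map (fun u => u.2.2))) := by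
  have hfun : (fun (acc : List (List Char) × List (List Char)) rb =>
        if pvPass rb then
          (acc.1 ++ [rb.1.map (fun u => u.1)], acc.2 ++ [rb.1.map (fun u => u.2.2)])
        else acc) =
      (fun (acc : List (List Char) × List (List Char)) rb =>
        ((fun (a : List (List Char)) rb =>
            if pvPass rb then a ++ [rb.1.map (fun u => u.1)] else a) acc.1 rb,
         (fun (a : List (List Char)) rb =>
            if pvPass rb then a ++ [rb.1.map (fun u => u.2.2)] else a) acc.2 rb)) := by
    funext acc rb
    by_cases hc : pvPass rb <;> simp [hc]
  rw [hfun, PySem.List.foldl_prod_mk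
    (f := fun (a : List (List Char)) rb => if pvPass rb then a ++ [rb.1.map (fun u => u.1)] else a)
    (g := fun (a : List (List Char)) rb => if pvPass rb then a ++ [rb.1.map (fun u => u.2.2)] else a),
    PySem.List.foldl_append_if, PySem.List.foldl_append_if]
  simp

theorem pvJoinFlat1 (rs : List (List (Char × Char × Char) × Bool)) :
    PySem.Chars.join [] ((rs.map (fun rb => rb.1.map (fun u => u.1))).map (fun t => ' ' :: t)) =
      rs.flatMap (fun rb => ' ' :: rb.1.map (fun u => u.1)) := by
  rw [pvJoinNil]
  simp [List.map_map, List.flatMap_def, Function.comp_def]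

theorem pvJoinFlat2 (rs : List (List (Char × Char × Char) × Bool)) :
    PySem.Chars.join [] ((rs.map (fun rb => rb.1.map (fun u => u.2.2))).map (fun t => ' ' :: t)) =
      rs.flatMap (fun rb => ' ' :: rb.1.map (fun u => u.2.2)) := by
  rw [pvJoinNil]
  simp [List.map_map, List.flatMap_def, Function.comp_def]

-- ===== VERDICT (by name: the statement is the Claim_ definition above) =====
theorem get_sequence_alignment_spec : Claim_equal_get_sequence_alignment := by
  intro s _
  unfold Spec_get_sequence_alignment
  have hh : pvHeaderB = pvHeaderA := rfl
  simp only [get_sequence_alignment, get_sequence_alignment_alt, hh]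
  have hA := (pvMain ((pvHeaderA s).1.zip ((pvHeaderA s).2.1.zip (pvHeaderA s).2.2))).1
    [] [] none none none [] (by simp)
  rw [hA, pvPartsEq, pvJoinFlat1, pvJoinFlat2]
  simp [pvFlat1, pvFlat2]
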